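-- pv_equiv track=rewrite | github.com/cathiec/Enhanced_Model_Checker | pynusmv_formula.py | cal_min
-- ===== SOURCE A (Python) =====
-- import copy
--
-- def bigger(f1, f2):
--     if len(f1) > len(f2):
--         return False
--     else:
--         for i in range(len(f1)):
--             if (i >= len(f2)) | (f1[i] != f2[i]):
--                 return False
--         return True
--
-- def cal_min(s):
--     result = []
--     for i in range(len(s)):
--         is_min = True
--         for j in range(i + 1, len(s)):
--             if bigger(s[i], s[j]):
--                 is_min = False
--                 break
--         if is_min == True:
--             result.append(copy.copy(s[i]))
--     return result
-- ===== SOURCE B (Python) =====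
-- def cal_min(s):
--     # One right-to-left pass keeping a set of all prefixes of already-seen (later) elements.
--     seen = set()
--     out = []
--     for x in reversed(s):
--         if tuple(x) not in seen:
--             out.append(list(x))
--         t = ()
--         seen.add(t)
--         for v in x:
--             t += (v,)
--             seen.add(t)
--     out.reverse()
--     return out
-- ===== Notes on version B (the rewrite author's own statement) =====
-- stated objective: faster
-- what changed: Replaced the quadratic all-later-pairs prefix scan by a single right-to-left pass that keeps a hash set of all prefixes of already-seen later elements and tests membership of each element in it.
import Mathlib
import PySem

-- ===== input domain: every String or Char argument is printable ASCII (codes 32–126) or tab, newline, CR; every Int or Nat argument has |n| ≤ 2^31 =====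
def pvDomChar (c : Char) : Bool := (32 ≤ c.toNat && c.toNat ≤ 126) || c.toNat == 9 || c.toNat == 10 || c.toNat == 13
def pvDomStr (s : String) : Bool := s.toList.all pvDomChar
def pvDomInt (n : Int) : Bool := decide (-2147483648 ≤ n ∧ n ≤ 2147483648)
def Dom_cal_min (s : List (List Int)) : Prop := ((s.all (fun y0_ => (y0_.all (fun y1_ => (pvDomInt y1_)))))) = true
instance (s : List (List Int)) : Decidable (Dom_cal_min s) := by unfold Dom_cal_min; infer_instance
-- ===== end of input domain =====

-- B replaces A's scan over all later elements per element by a single right-to-left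
-- pass keeping a set of all prefixes of already-seen later elements (objective: faster).

-- ===== PORT A =====
-- the loop 'for i in range(len(f1)): if (i >= len(f2)) | (f1[i] != f2[i]): return False'
def biggerGo (f1 f2 : List Int) : List Int → Bool
  | [] => true
  | i :: rest =>
    if decide (i ≥ (f2.length : Int)) || decide (PySem.List.pyGet? f1 i ≠ PySem.List.pyGet? f2 i) then
      false
    else biggerGo f1 f2 rest

def bigger (f1 f2 : List Int) : Bool :=
  if f1.length > f2.length then false
  else biggerGo f1 f2 (PySem.List.pyRange 0 (f1.length : Int) 1)

-- the loop 'for j in range(i+1, len(s)): if bigger(s[i], s[j]): is_min = False; break'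
def calMinInner (si : List Int) : List (List Int) → Bool
  | [] => true
  | sj :: rest => if bigger si sj then false else calMinInner si rest

def cal_min (s : List (List Int)) : List (List Int) :=
  match s with
  | [] => []
  | x :: rest => (if calMinInner x rest then [x] else []) ++ cal_min rest

-- ===== PORT B =====
-- the loop 't = (); seen.add(t); for v in x: t += (v,); seen.add(t)': adds every prefix of x
def addPrefixes (seen : PySem.Set (List Int)) (x : List Int) : PySem.Set (List Int) :=
  PySem.Set.update seen x.inits

-- 'for x in reversed(s)': the tail (later elements) is processed first; x is checked
-- against the seen-set, prepended if fresh (out.append + final reverse), then its prefixes are added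
def calMinAltGo (s : List (List Int)) : PySem.Set (List Int) × List (List Int) :=
  match s with
  | [] => (PySem.Set.empty, [])
  | x :: rest =>
    let p := calMinAltGo rest
    (addPrefixes p.1 x, if PySem.Set.contains p.1 x then p.2 else x :: p.2)

def cal_min_alt (s : List (List Int)) : List (List Int) :=
  (calMinAltGo s).2

-- ===== PRECONDITION & SPEC =====
def Spec_cal_min (s : List (List Int)) (out : List (List Int)) : Prop := out = cal_min_alt s
instance (s : List (List Int)) (out : List (List Int)) : Decidable (Spec_cal_min s out) := by unfold Spec_cal_min; infer_instance

-- ===== CLAIM (what is proved, stated in full; the proofs are below) =====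
def Claim_equal_cal_min : Prop := ∀ (s : List (List Int)), Dom_cal_min s → Spec_cal_min s (cal_min s)

-- ===== LEMMAS AND PROOFS =====

theorem prefix_iff_getElem? (f1 f2 : List Int) :
    f1 <+: f2 ↔ f1.length ≤ f2.length ∧ ∀ i < f1.length, f1[i]? = f2[i]? := by
  constructor
  · rintro ⟨t, rfl⟩
    refine ⟨by simp, fun i hi => ?_⟩
    rw [List.getElem?_append_left hi]
  · rintro ⟨h, h2⟩
    rw [List.prefix_iff_eq_take]
    apply List.ext_getElem?
    intro i
    by_cases hi : i < f1.length
    · rw [List.getElem?_take_of_lt hi, (h2 i hi)]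
    · rw [List.getElem?_eq_none (by omega), List.getElem?_eq_none (by simp; omega)]

theorem biggerGo_eq_all (f1 f2 : List Int) (l : List Int) :
    biggerGo f1 f2 l = l.all
      (fun i => !(decide (i ≥ (f2.length : Int)) || decide (PySem.List.pyGet? f1 i ≠ PySem.List.pyGet? f2 i))) := by
  induction l with
  | nil => rfl
  | cons i rest ih =>
    simp only [biggerGo, List.all_cons]
    split_ifs with h
    · rw [h]; rfl
    · rw [Bool.not_eq_true] at h
      rw [h, ih]; rfl

theorem bigger_iff (f1 f2 : List Int) : bigger f1 f2 = true ↔ f1 <+: f2 := by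
  unfold bigger
  split_ifs with h
  · simp only [false_iff]
    intro hp
    exact absurd hp.length_le (by omega)
  · rw [biggerGo_eq_all, prefix_iff_getElem?]
    have hle : f1.length ≤ f2.length := by omega
    simp only [PySem.List.pyRange_zero_natCast, List.all_eq_true,
      List.mem_map, List.mem_range, Bool.not_eq_eq_eq_not, Bool.not_true, Bool.or_eq_false_iff,
      decide_eq_false_iff_not, not_le, not_not, forall_exists_index, and_imp]
    constructor
    · intro hall
      refine ⟨hle, fun i hi => ?_⟩
      have := hall (i:Int) i hi rfl
      have h2 := this.2
      rw [PySem.List.pyGet?_natCast, PySem.List.pyGet?_natCast] at h2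
      simpa using h2
    · rintro ⟨-, hall⟩ x i hi rfl
      refine ⟨by exact_mod_cast lt_of_lt_of_le hi hle, ?_⟩
      rw [PySem.List.pyGet?_natCast, PySem.List.pyGet?_natCast]
      simpa using hall i hi

theorem calMinInner_iff (x : List Int) (l : List (List Int)) :
    calMinInner x l = true ↔ ¬ ∃ y ∈ l, x <+: y := by
  induction l with
  | nil => simp [calMinInner]
  | cons y rest ih =>
    simp only [calMinInner]
    split_ifs with h
    · simp only [false_iff, not_not]
      exact ⟨y, by simp, (bigger_iff x y).mp h⟩
    · rw [ih]
      have hny : ¬ x <+: y := fun hp => h ((bigger_iff x y).mpr hp)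
      constructor
      · rintro hn ⟨z, hz, hp⟩
        rcases List.mem_cons.mp hz with rfl | hz
        · exact hny hp
        · exact hn ⟨z, hz, hp⟩
      · exact fun hn ⟨z, hz, hp⟩ => hn ⟨z, List.mem_cons_of_mem _ hz, hp⟩

theorem mem_calMinAltGo_fst (s : List (List Int)) (z : List Int) :
    z ∈ (calMinAltGo s).1 ↔ ∃ y ∈ s, z <+: y := by
  induction s with
  | nil => simp [calMinAltGo, PySem.Set.empty]
  | cons x rest ih =>
    simp only [calMinAltGo, addPrefixes, PySem.Set.mem_update, ih, List.mem_inits,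
      List.mem_cons]
    constructor
    · rintro (⟨y, hy, hp⟩ | hp)
      · exact ⟨y, Or.inr hy, hp⟩
      · exact ⟨x, Or.inl rfl, hp⟩
    · rintro ⟨y, rfl | hy, hp⟩
      · exact Or.inr hp
      · exact Or.inl ⟨y, hy, hp⟩

theorem cal_min_eq_alt (s : List (List Int)) : cal_min s = cal_min_alt s := by
  induction s with
  | nil => rfl
  | cons x rest ih =>
    have hc : PySem.Set.contains (calMinAltGo rest).1 x = true ↔ ∃ y ∈ rest, x <+: y :=
      (PySem.Set.contains_iff _ _).trans (mem_calMinAltGo_fst rest x)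
    simp only [cal_min, cal_min_alt, calMinAltGo]
    by_cases hex : ∃ y ∈ rest, x <+: y
    · rw [if_neg (by rw [calMinInner_iff]; exact not_not.mpr hex), if_pos (hc.mpr hex)]
      simpa using ih
    · rw [if_pos ((calMinInner_iff x rest).mpr hex),
        if_neg (fun hcon => hex (hc.mp hcon))]
      simpa using ih

-- ===== VERDICT (by name: the statement is the Claim_ definition above) =====
theorem cal_min_spec : Claim_equal_cal_min := by
  intro s _
  unfold Spec_cal_min
  exact cal_min_eq_alt s
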